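-- pv_equiv track=rewrite | github.com/JJPR030803/NetGuard | src/network_security_suite/ml/preprocessing/utils.py | parse_tcp_flags
-- ===== SOURCE A (Python) =====
-- from typing import Any, Dict, List, Union
--
-- def parse_tcp_flags(flags: str) -> Dict[str, bool]:
--     """
--     Parse TCP flags string into a dictionary of boolean values.
--
--     Args:
--         flags: TCP flags string (e.g., "SA", "PA", "F")
--
--     Returns:
--         dict: Mapping of flag name to boolean (present or not)
--
--     Example:
--         >>> parse_tcp_flags("SA")
--         {'FIN': False, 'SYN': True, 'RST': False, 'PSH': False,
--          'ACK': True, 'URG': False, 'ECE': False, 'CWR': False}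
--     """
--     flag_map = {
--         'F': 'FIN',
--         'S': 'SYN',
--         'R': 'RST',
--         'P': 'PSH',
--         'A': 'ACK',
--         'U': 'URG',
--         'E': 'ECE',
--         'C': 'CWR'
--     }
--
--     result = {name: False for name in flag_map.values()}
--
--     if flags:
--         for char in flags.upper():
--             if char in flag_map:
--                 result[flag_map[char]] = True
--
--     return result
-- ===== SOURCE B (Python) =====
-- def parse_tcp_flags(flags: str) -> dict:
--     flag_map = {
--         'F': 'FIN',
--         'S': 'SYN',
--         'R': 'RST',
--         'P': 'PSH',
--         'A': 'ACK',
--         'U': 'URG',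
--         'E': 'ECE',
--         'C': 'CWR'
--     }
--     upper = flags.upper() if flags else ''
--     return {name: letter in upper for letter, name in flag_map.items()}
-- ===== Notes on version B (the rewrite author's own statement) =====
-- stated objective: idiomatic
-- what changed: B reverses the traversal: instead of initialising an all-False dict and scanning the input's characters to flip entries, it builds the result in one comprehension over the eight known flags, testing each flag's letter for membership in the uppercased input.
import Mathlib
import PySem

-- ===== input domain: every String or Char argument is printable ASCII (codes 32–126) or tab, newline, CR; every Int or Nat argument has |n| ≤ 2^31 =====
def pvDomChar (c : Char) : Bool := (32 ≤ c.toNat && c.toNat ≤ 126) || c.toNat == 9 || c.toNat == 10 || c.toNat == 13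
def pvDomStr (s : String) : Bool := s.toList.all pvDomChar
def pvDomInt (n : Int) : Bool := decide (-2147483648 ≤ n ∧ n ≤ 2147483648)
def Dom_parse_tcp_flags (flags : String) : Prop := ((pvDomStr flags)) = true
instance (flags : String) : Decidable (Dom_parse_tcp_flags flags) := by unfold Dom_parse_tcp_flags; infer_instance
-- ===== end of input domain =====

-- B inverts the traversal: it tests each of the 8 known flags for membership in the uppercased
-- input instead of scanning input chars and mutating a dict. Objective: idiomatic; constant-factor faster (8 C-level substring scans vs a Python-level loop over every char).

-- ===== PORT A =====
def pvFlagMapA : PySem.Dict String String :=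
  PySem.Dict.ofList [("F","FIN"),("S","SYN"),("R","RST"),("P","PSH"),
                     ("A","ACK"),("U","URG"),("E","ECE"),("C","CWR")]

def parse_tcp_flags (flags : String) : List (String × Bool) :=
  let flag_map := pvFlagMapA
  let result : PySem.Dict String Bool :=
    PySem.Dict.ofList (flag_map.values.map (fun name => (name, false)))
  let result :=
    if flags ≠ "" then            -- 'if flags:' — a str is truthy iff non-empty
      -- for char in flags.upper(): if char in flag_map: result[flag_map[char]] = True
      -- (flag_map[char] ported as getD with an unused default; the branch guarantees the key exists)
      (PySem.Str.upper flags).toList.foldl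
        (fun d c =>
          if flag_map.contains (String.ofList [c]) then
            d.insert (flag_map.getD (String.ofList [c]) "") true
          else d)
        result
    else result
  result.items

-- ===== PORT B =====
def pvFlagPairsB : List (Char × String) :=
  [('F',"FIN"),('S',"SYN"),('R',"RST"),('P',"PSH"),
   ('A',"ACK"),('U',"URG"),('E',"ECE"),('C',"CWR")]

def parse_tcp_flags_alt (flags : String) : List (String × Bool) :=
  let upper := if flags ≠ "" then PySem.Str.upper flags else ""
  -- 'letter in upper' for a one-character letter = membership of that char in upper (exact)
  pvFlagPairsB.map (fun p => (p.2, upper.toList.contains p.1))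

-- ===== PRECONDITION & SPEC =====
def Spec_parse_tcp_flags (flags : String) (out : List (String × Bool)) : Prop := out = parse_tcp_flags_alt flags
instance (flags : String) (out : List (String × Bool)) : Decidable (Spec_parse_tcp_flags flags out) := by unfold Spec_parse_tcp_flags; infer_instance

-- ===== CLAIM (what is proved, stated in full; the proofs are below) =====
def Claim_equal_parse_tcp_flags : Prop := ∀ (flags : String), Dom_parse_tcp_flags flags → Spec_parse_tcp_flags flags (parse_tcp_flags flags)

-- ===== LEMMAS AND PROOFS =====

/-- A's loop state: the eight flag names with their current booleans. -/
def pvSt (b1 b2 b3 b4 b5 b6 b7 b8 : Bool) : PySem.Dict String Bool :=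
  PySem.Dict.mk [("FIN",b1),("SYN",b2),("RST",b3),("PSH",b4),
                 ("ACK",b5),("URG",b6),("ECE",b7),("CWR",b8)]

/-- One step of A's loop ORs each flag's boolean with 'this char is that flag's letter'. -/
theorem pvStep (c : Char) (b1 b2 b3 b4 b5 b6 b7 b8 : Bool) :
    (if pvFlagMapA.contains (String.ofList [c]) then
        (pvSt b1 b2 b3 b4 b5 b6 b7 b8).insert (pvFlagMapA.getD (String.ofList [c]) "") true
      else pvSt b1 b2 b3 b4 b5 b6 b7 b8)
    = pvSt (b1 || (c == 'F')) (b2 || (c == 'S')) (b3 || (c == 'R')) (b4 || (c == 'P'))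
           (b5 || (c == 'A')) (b6 || (c == 'U')) (b7 || (c == 'E')) (b8 || (c == 'C')) := by
  by_cases h1 : c = 'F'
  · subst h1; revert b1 b2 b3 b4 b5 b6 b7 b8; decide
  by_cases h2 : c = 'S'
  · subst h2; revert b1 b2 b3 b4 b5 b6 b7 b8; decide
  by_cases h3 : c = 'R'
  · subst h3; revert b1 b2 b3 b4 b5 b6 b7 b8; decide
  by_cases h4 : c = 'P'
  · subst h4; revert b1 b2 b3 b4 b5 b6 b7 b8; decide
  by_cases h5 : c = 'A'
  · subst h5; revert b1 b2 b3 b4 b5 b6 b7 b8; decide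
  by_cases h6 : c = 'U'
  · subst h6; revert b1 b2 b3 b4 b5 b6 b7 b8; decide
  by_cases h7 : c = 'E'
  · subst h7; revert b1 b2 b3 b4 b5 b6 b7 b8; decide
  by_cases h8 : c = 'C'
  · subst h8; revert b1 b2 b3 b4 b5 b6 b7 b8; decide
  · -- c is none of the eight letters: the step is a no-op
    have hm : pvFlagMapA = PySem.Dict.mk [("F","FIN"),("S","SYN"),("R","RST"),("P","PSH"),
        ("A","ACK"),("U","URG"),("E","ECE"),("C","CWR")] := by decide
    have key : ∀ d c : Char, (String.ofList [d] = String.ofList [c]) ↔ d = c := by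
      intro d c
      constructor
      · intro he; simpa using congrArg String.toList he
      · intro he; rw [he]
    simp [hm, PySem.Dict.contains,
      show ∀ c, (("F":String) = String.ofList [c]) ↔ 'F' = c from key 'F',
      show ∀ c, (("S":String) = String.ofList [c]) ↔ 'S' = c from key 'S',
      show ∀ c, (("R":String) = String.ofList [c]) ↔ 'R' = c from key 'R',
      show ∀ c, (("P":String) = String.ofList [c]) ↔ 'P' = c from key 'P',
      show ∀ c, (("A":String) = String.ofList [c]) ↔ 'A' = c from key 'A',
      show ∀ c, (("U":String) = String.ofList [c]) ↔ 'U' = c from key 'U',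
      show ∀ c, (("E":String) = String.ofList [c]) ↔ 'E' = c from key 'E',
      show ∀ c, (("C":String) = String.ofList [c]) ↔ 'C' = c from key 'C',
      Ne.symm h1, Ne.symm h2, Ne.symm h3, Ne.symm h4,
      Ne.symm h5, Ne.symm h6, Ne.symm h7, Ne.symm h8,
      beq_eq_false_iff_ne.mpr h1, beq_eq_false_iff_ne.mpr h2,
      beq_eq_false_iff_ne.mpr h3, beq_eq_false_iff_ne.mpr h4,
      beq_eq_false_iff_ne.mpr h5, beq_eq_false_iff_ne.mpr h6,
      beq_eq_false_iff_ne.mpr h7, beq_eq_false_iff_ne.mpr h8]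

/-- Invariant of A's loop: each flag's boolean ends up OR-ed with membership of its letter. -/
theorem pvLoopInv (cs : List Char) : ∀ (b1 b2 b3 b4 b5 b6 b7 b8 : Bool),
    cs.foldl
      (fun d c =>
        if pvFlagMapA.contains (String.ofList [c]) then
          d.insert (pvFlagMapA.getD (String.ofList [c]) "") true
        else d)
      (pvSt b1 b2 b3 b4 b5 b6 b7 b8)
    = pvSt (b1 || cs.contains 'F') (b2 || cs.contains 'S') (b3 || cs.contains 'R')
           (b4 || cs.contains 'P') (b5 || cs.contains 'A') (b6 || cs.contains 'U')
           (b7 || cs.contains 'E') (b8 || cs.contains 'C') := by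
  induction cs with
  | nil => simp
  | cons c cs ih =>
    intro b1 b2 b3 b4 b5 b6 b7 b8
    rw [List.foldl_cons, pvStep, ih]
    have hcd : ∀ d : Char, (c == d) = decide (d = c) := by
      intro d
      by_cases hd : c = d
      · subst hd; simp
      · simp [hd, Ne.symm hd]
    simp [hcd, Bool.or_assoc]

-- ===== VERDICT (by name: the statement is the Claim_ definition above) =====
theorem parse_tcp_flags_spec : Claim_equal_parse_tcp_flags := by
  intro flags _
  unfold Spec_parse_tcp_flags parse_tcp_flags parse_tcp_flags_alt
  by_cases h : flags = ""
  · subst h; decide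
  · simp only [h, ne_eq, not_false_eq_true, if_pos]
    have h0 : PySem.Dict.ofList (pvFlagMapA.values.map (fun name => (name, false)))
        = pvSt false false false false false false false false := by decide
    rw [h0, pvLoopInv]
    simp [pvSt, pvFlagPairsB]
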